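-- pv_equiv track=rewrite | github.com/s0547068/AbgeordnetenWatch | beifall_partei.py | find_last_brackets_in_string
-- ===== SOURCE A (Python) =====
-- def find_last_brackets_in_string(string):
--     i = 0
--     index_of_last_open_bracket = 0
--     index_of_last_closed_bracket = 0
--
--     found_higher_index = True
--
--     while found_higher_index == True:
--         for letter in string[i:]:
--             if letter == '(':
--                 found_higher_index = True
--                 index_of_last_open_bracket = i
--             i += 1
--             if i == len(string):
--                 found_higher_index = False
--
--     found_higher_index = True
--
--     i = 0
--     while found_higher_index == True:
--         for letter in string[i:]:
--             if letter == ')':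
--                 found_higher_index = True
--                 index_of_last_closed_bracket = i
--             i += 1
--             if i == len(string):
--                 found_higher_index = False
--
--     return index_of_last_open_bracket, index_of_last_closed_bracket
-- ===== SOURCE B (Python) =====
-- def find_last_brackets_in_string(string):
--     def last_index(ch):
--         for i in range(len(string) - 1, -1, -1):
--             if string[i] == ch:
--                 return i
--         return 0
--     return last_index('('), last_index(')')
-- ===== Notes on version B (the rewrite author's own statement) =====
-- stated objective: simpler
-- what changed: Replaces A's restartable while/for machinery with two full forward passes by two backward scans that early-exit at the first match (the last occurrence), defaulting to 0 when the bracket is absent.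
import Mathlib
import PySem

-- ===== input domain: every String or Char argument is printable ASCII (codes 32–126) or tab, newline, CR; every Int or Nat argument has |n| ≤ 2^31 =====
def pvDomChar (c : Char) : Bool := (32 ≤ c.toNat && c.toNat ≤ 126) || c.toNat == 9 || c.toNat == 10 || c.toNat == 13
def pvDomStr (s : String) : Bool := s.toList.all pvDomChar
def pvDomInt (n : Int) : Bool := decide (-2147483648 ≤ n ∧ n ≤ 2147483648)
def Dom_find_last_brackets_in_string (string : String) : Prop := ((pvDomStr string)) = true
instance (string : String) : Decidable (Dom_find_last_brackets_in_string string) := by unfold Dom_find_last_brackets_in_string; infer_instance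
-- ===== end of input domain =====

-- B replaces A's restartable while/for scanning machinery with two backward scans that
-- early-exit at the first match (simpler, same O(n)); return values only, A mutates nothing.

-- ===== PORT A =====
-- one iteration of A's for-body over state (i, idx, found); len = len(string)
def pvStepA (c : Char) (len : Int) (st : Int × Int × Bool) (letter : Char) : Int × Int × Bool :=
  let (i, idx, found) := st
  let (found, idx) := if letter = c then (true, i) else (found, idx)
  let i := i + 1
  let found := if i = len then false else found
  (i, idx, found)

-- one iteration of A's while-body: 'for letter in string[i:]: …'
def pvPassA (c : Char) (l : List Char) (st : Int × Int × Bool) : Int × Int × Bool :=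
  (PySem.List.slice l (some st.1) none).foldl (pvStepA c (l.length : Int)) st

-- A's 'while found_higher_index == True:' loop; on the empty string Python loops forever
-- (excluded by Pre_), so the recursion carries fuel (length+1 is ample: one pass ends it).
def pvWhileA (c : Char) (l : List Char) : Nat → (Int × Int × Bool) → Int × Int × Bool
  | 0, st => st
  | n + 1, st => if st.2.2 = true then pvWhileA c l n (pvPassA c l st) else st

def find_last_brackets_in_string (string : String) : Int × Int :=
  let l := string.toList
  let st1 := pvWhileA '(' l (l.length + 1) (0, 0, true)
  let st2 := pvWhileA ')' l (l.length + 1) (0, 0, true)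
  (st1.2.1, st2.2.1)

-- ===== PORT B =====
-- B's 'for i in range(len(string)-1, -1, -1): if string[i] == ch: return i' ; 'return 0'
-- k counts down: checking index k-1; the index read is always in range, so getD is exact.
def pvLastIdxB (l : List Char) (c : Char) : Nat → Int
  | 0 => 0
  | k + 1 => if l.getD k ' ' = c then (k : Int) else pvLastIdxB l c k

def find_last_brackets_in_string_alt (string : String) : Int × Int :=
  let l := string.toList
  (pvLastIdxB l '(' l.length, pvLastIdxB l ')' l.length)

-- ===== PRECONDITION & SPEC =====
-- Pre_ excludes exactly the empty string, on which Python A never terminates (its outer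
-- while loop never runs the for body that would clear the flag).
def Pre_find_last_brackets_in_string (string : String) : Prop := string ≠ ""
instance (string : String) : Decidable (Pre_find_last_brackets_in_string string) := by unfold Pre_find_last_brackets_in_string; infer_instance
def pvWitness_find_last_brackets_in_string : String := "a(b)"

def Spec_find_last_brackets_in_string (string : String) (out : Int × Int) : Prop := out = find_last_brackets_in_string_alt string
instance (string : String) (out : Int × Int) : Decidable (Spec_find_last_brackets_in_string string out) := by unfold Spec_find_last_brackets_in_string; infer_instance

-- ===== CLAIM (what is proved, stated in full; the proofs are below) =====
def Claim_equal_find_last_brackets_in_string : Prop := ∀ (string : String), Dom_find_last_brackets_in_string string → Pre_find_last_brackets_in_string string → Spec_find_last_brackets_in_string string (find_last_brackets_in_string string)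

-- ===== LEMMAS AND PROOFS =====

-- the idx component of A's fold, isolated (it depends on neither 'found' nor the length check)
def pvIdxA (c : Char) : List Char → Int → Int → Int
  | [], _, idx => idx
  | a :: t, i, idx => pvIdxA c t (i + 1) (if a = c then i else idx)

lemma pvStepA_eval (c : Char) (len i idx : Int) (f : Bool) (a : Char) :
    pvStepA c len (i, idx, f) a
      = (i + 1, (if a = c then i else idx), if i + 1 = len then false else (if a = c then true else f)) := by
  by_cases h : a = c <;> simp [pvStepA, h]

-- one full pass of A's for-loop from (i0, idx0, f0) with i0 + |l| = len lands on (len, idxA, false)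
lemma pvPassA_fold (c : Char) (len : Int) :
    ∀ (l : List Char) (i0 idx0 : Int) (f0 : Bool), l ≠ [] → i0 + (l.length : Int) = len →
      l.foldl (pvStepA c len) (i0, idx0, f0) = (len, pvIdxA c l i0 idx0, false) := by
  intro l
  induction l with
  | nil => intro _ _ _ h _; exact absurd rfl h
  | cons a t ih =>
    intro i0 idx0 f0 _ hlen
    rw [List.foldl_cons, pvStepA_eval]
    cases t with
    | nil =>
      have h1 : i0 + 1 = len := by simpa using hlen
      simp [pvIdxA, h1]
    | cons b t' =>
      have hne : (b :: t') ≠ ([] : List Char) := by simp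
      have hlen' : (i0 + 1) + ((b :: t').length : Int) = len := by
        simp only [List.length_cons] at hlen ⊢; push_cast at hlen ⊢; omega
      rw [ih (i0 + 1) (if a = c then i0 else idx0) _ hne hlen']
      rfl

-- idxA over l ++ [a]: the last element wins if it matches
lemma pvIdxA_append (c : Char) (a : Char) :
    ∀ (l : List Char) (i0 idx0 : Int),
      pvIdxA c (l ++ [a]) i0 idx0 = if a = c then i0 + (l.length : Int) else pvIdxA c l i0 idx0 := by
  intro l
  induction l with
  | nil => intro i0 idx0; simp [pvIdxA]
  | cons b t ih =>
    intro i0 idx0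
    simp only [List.cons_append, pvIdxA, ih, List.length_cons]
    push_cast
    ring_nf

-- B's scan ignores an appended element while its countdown stays within the prefix
lemma pvLastIdxB_append (c a : Char) (l : List Char) :
    ∀ (k : Nat), k ≤ l.length → pvLastIdxB (l ++ [a]) c k = pvLastIdxB l c k := by
  intro k
  induction k with
  | zero => intro _; rfl
  | succ k ih =>
    intro hk
    have hk' : k < l.length := hk
    simp only [pvLastIdxB, ih (Nat.le_of_lt hk'), List.getD_append l [a] ' ' k hk']

-- core: A's forward 'last seen' accumulation equals B's backward early-exit scan
lemma pvIdxA_eq_lastIdxB (c : Char) (l : List Char) :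
    pvIdxA c l 0 0 = pvLastIdxB l c l.length := by
  induction l using List.reverseRecOn with
  | nil => rfl
  | append_singleton t a ih =>
    rw [pvIdxA_append]
    have hget : (t ++ [a]).getD t.length ' ' = a := by
      simp [List.getD_eq_getElem?_getD]
    show _ = pvLastIdxB (t ++ [a]) c ((t ++ [a]).length)
    simp only [List.length_append, List.length_cons, List.length_nil]
    show _ = pvLastIdxB (t ++ [a]) c (t.length + 1)
    simp only [pvLastIdxB, hget, pvLastIdxB_append c a t t.length (Nat.le_refl _), ih]
    simp

-- on a nonempty list A's while loop runs its pass exactly once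
lemma pvWhileA_eval (c : Char) (l : List Char) (h : l ≠ []) :
    pvWhileA c l (l.length + 1) (0, 0, true) = ((l.length : Int), pvIdxA c l 0 0, false) := by
  have hpass : pvPassA c l (0, 0, true) = ((l.length : Int), pvIdxA c l 0 0, false) := by
    unfold pvPassA
    rw [show PySem.List.slice l (some (0 : Int)) none = l by
      simp [PySem.List.slice_from_natCast l 0]]
    exact pvPassA_fold c (l.length : Int) l 0 0 true h (by simp)
  have hstop : ∀ (n : Nat) (st : Int × Int × Bool), st.2.2 = false → pvWhileA c l n st = st := by
    intro n st hst
    cases n with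
    | zero => rfl
    | succ m => simp [pvWhileA, hst]
  cases hn : l.length with
  | zero => exact absurd (List.length_eq_zero_iff.mp hn) h
  | succ m =>
    rw [show m + 1 + 1 = (m + 1) + 1 from rfl, pvWhileA]
    simp only [hpass, hn]
    exact hstop _ _ rfl

-- ===== VERDICT (by name: the statement is the Claim_ definition above) =====
theorem find_last_brackets_in_string_spec : Claim_equal_find_last_brackets_in_string := by
  intro s _ hpre
  have hl : s.toList ≠ [] := by
    intro h
    exact hpre (by cases s; simp_all)
  unfold Spec_find_last_brackets_in_string find_last_brackets_in_string find_last_brackets_in_string_alt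
  simp only [pvWhileA_eval _ _ hl, pvIdxA_eq_lastIdxB]
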